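-- pv_equiv track=rewrite | github.com/marataya/python_algos | yandex/longest_period.py | find_max_free_period
-- ===== SOURCE A (Python) =====
-- def find_max_free_period(schedule):
--     start = 0
--     end = 0
--     max_start = 0
--     max_length = 0
--
--     while end < len(schedule):
--         if not schedule[end]:
--             end += 1
--             if end - start > max_length:
--                 max_start = start
--                 max_length = end - start
--         else:
--             start = end = end + 1
--
--     if max_length == 0:
--         return "0 0"
--     else:
--         return f"{max_start + 1} {max_start + max_length}"
--
-- schedule = []
-- ===== SOURCE B (Python) =====
-- def find_max_free_period(schedule):
--     # Group-then-select: scan maximal runs of equal truthiness and keep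
--     # the earliest longest falsy run (strict '>' keeps the first on ties).
--     best_start = 0
--     best_len = 0
--     n = len(schedule)
--     i = 0
--     while i < n:
--         j = i
--         while j < n and bool(schedule[j]) == bool(schedule[i]):
--             j += 1
--         if not schedule[i] and j - i > best_len:
--             best_start, best_len = i, j - i
--         i = j
--     if best_len == 0:
--         return "0 0"
--     return f"{best_start + 1} {best_start + best_len}"
-- ===== Notes on version B (the rewrite author's own statement) =====
-- stated objective: alternative
-- what changed: Replaces A's one-pass state machine (start/end pointers with per-element best updates) by a group-then-select scan: an inner scan finds each maximal run of equal truthiness, and only whole falsy runs are compared against the best.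
import Mathlib
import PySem

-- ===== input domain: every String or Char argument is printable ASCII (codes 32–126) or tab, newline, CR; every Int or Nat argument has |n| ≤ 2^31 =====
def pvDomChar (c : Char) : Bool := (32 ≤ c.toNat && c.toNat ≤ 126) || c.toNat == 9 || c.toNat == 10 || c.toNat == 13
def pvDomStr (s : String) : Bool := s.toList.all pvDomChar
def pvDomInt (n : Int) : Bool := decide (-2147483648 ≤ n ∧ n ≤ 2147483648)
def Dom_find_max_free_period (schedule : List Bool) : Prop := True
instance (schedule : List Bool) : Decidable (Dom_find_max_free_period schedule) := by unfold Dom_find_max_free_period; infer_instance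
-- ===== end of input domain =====

-- B replaces A's one-pass start/end state machine by a group-then-select scan over maximal runs (same O(n) cost, different decomposition).


-- ===== PORT A =====
-- A's while loop: `end` rises by exactly 1 each iteration and indexes `schedule[end]`,
-- so it is transcribed as structural recursion on the unread suffix, carrying
-- (start, end, max_start, max_length) exactly as A does.
def pvLoopA : List Bool → Int → Int → Int → Int → Int × Int
  | [], _, _, ms, ml => (ms, ml)
  | c :: rest, start, e, ms, ml =>
    if c = false then
      if e + 1 - start > ml then pvLoopA rest start (e + 1) start (e + 1 - start)
      else pvLoopA rest start (e + 1) ms ml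
    else pvLoopA rest (e + 1) (e + 1) ms ml

def find_max_free_period (schedule : List Bool) : String :=
  let p := pvLoopA schedule 0 0 0 0
  if p.2 = 0 then "0 0"
  else PySem.Int.toStr (p.1 + 1) ++ " " ++ PySem.Int.toStr (p.1 + p.2)

-- ===== PORT B =====
-- Inner scan of Source B: length of the maximal leading run equal to `b`, and the remainder.
def pvTakeRun (b : Bool) : List Bool → Nat × List Bool
  | [] => (0, [])
  | c :: rest =>
    if c = b then
      let p := pvTakeRun b rest
      (p.1 + 1, p.2)
    else (0, c :: rest)

theorem pvTakeRun_len (b : Bool) : ∀ l : List Bool, (pvTakeRun b l).2.length ≤ l.length := by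
  intro l
  induction l with
  | nil => simp [pvTakeRun]
  | cons c rest ih =>
    by_cases h : c = b <;> simp [pvTakeRun, h] <;> omega

-- Outer loop of Source B: at index i, scan one maximal run (length k+1), compare whole run.
def pvLoopB : List Bool → Int → Int → Int → Int × Int
  | [], _, bs, bl => (bs, bl)
  | c :: rest, i, bs, bl =>
    let p := pvTakeRun c rest
    let j := i + (p.1 : Int) + 1
    if c = false ∧ j - i > bl then pvLoopB p.2 j i (j - i) else pvLoopB p.2 j bs bl
  termination_by l => l.length
  decreasing_by
    all_goals
      simp only [List.length_cons]
      exact Nat.lt_succ_of_le (pvTakeRun_len c rest)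

def find_max_free_period_alt (schedule : List Bool) : String :=
  let p := pvLoopB schedule 0 0 0
  if p.2 = 0 then "0 0"
  else PySem.Int.toStr (p.1 + 1) ++ " " ++ PySem.Int.toStr (p.1 + p.2)

-- ===== PRECONDITION & SPEC =====
def Spec_find_max_free_period (schedule : List Bool) (out : String) : Prop := out = find_max_free_period_alt schedule
instance (schedule : List Bool) (out : String) : Decidable (Spec_find_max_free_period schedule out) := by unfold Spec_find_max_free_period; infer_instance

-- ===== CLAIM (what is proved, stated in full; the proofs are below) =====
def Claim_equal_find_max_free_period : Prop := ∀ (schedule : List Bool), Dom_find_max_free_period schedule → Spec_find_max_free_period schedule (find_max_free_period schedule)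

-- ===== LEMMAS AND PROOFS =====

theorem pvLoopA_congr (l : List Bool) (s a b c a' b' c' : Int)
    (h1 : a = a') (h2 : b = b') (h3 : c = c') :
    pvLoopA l s a b c = pvLoopA l s a' b' c' := by subst h1; subst h2; subst h3; rfl

-- pvTakeRun decomposes the list into a maximal run plus a remainder starting differently.
theorem pvTakeRun_spec (b : Bool) : ∀ (l : List Bool) (k : Nat) (r : List Bool),
    pvTakeRun b l = (k, r) →
    l = List.replicate k b ++ r ∧ (∀ c r', r = c :: r' → c ≠ b) := by
  intro l
  induction l with
  | nil =>
    intro k r h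
    simp [pvTakeRun] at h
    obtain ⟨hk, hr⟩ := h
    subst hr
    exact ⟨by simp [← hk], fun c r2 hcr => by cases hcr⟩
  | cons c rest ih =>
    intro k r h
    by_cases hc : c = b
    · subst hc
      simp only [pvTakeRun, if_pos rfl] at h
      obtain ⟨k', r', hkr⟩ : ∃ k' r', pvTakeRun c rest = (k', r') := ⟨_, _, rfl⟩
      rw [hkr] at h
      obtain ⟨hdec, hmax⟩ := ih k' r' hkr
      cases h
      exact ⟨by simp [List.replicate_succ, ← hdec], hmax⟩
    · simp only [pvTakeRun, if_neg hc] at h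
      cases h
      refine ⟨by simp, ?_⟩
      intro d r' hd
      rw [List.cons.injEq] at hd
      rw [← hd.1]; exact hc

-- A run of falses: pvLoopA extends the current window by n and updates the best once, monotonically.
theorem pvLoopA_false_run : ∀ (n : Nat) (rest : List Bool) (s e ms ml : Int),
    e - s ≤ ml →
    pvLoopA (List.replicate n false ++ rest) s e ms ml
      = pvLoopA rest s (e + n)
          (if e + n - s > ml then s else ms)
          (if e + n - s > ml then e + n - s else ml) := by
  intro n
  induction n with
  | zero =>
    intro rest s e ms ml h
    simp only [List.replicate_zero, List.nil_append, Nat.cast_zero, add_zero]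
    rw [if_neg (by omega), if_neg (by omega)]
  | succ n ih =>
    intro rest s e ms ml h
    rw [List.replicate_succ]
    show (if false = false then
            if e + 1 - s > ml then pvLoopA (List.replicate n false ++ rest) s (e + 1) s (e + 1 - s)
            else pvLoopA (List.replicate n false ++ rest) s (e + 1) ms ml
          else pvLoopA (List.replicate n false ++ rest) (e + 1) (e + 1) ms ml) = _
    rw [if_pos rfl]
    by_cases hc : e + 1 - s > ml
    · rw [if_pos hc, ih rest s (e + 1) s (e + 1 - s) (by omega)]
      apply pvLoopA_congr
      · push_cast; ring
      · split_ifs <;> push_cast at * <;> omega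
      · split_ifs <;> push_cast at * <;> omega
    · rw [if_neg hc, ih rest s (e + 1) ms ml (by omega)]
      apply pvLoopA_congr
      · push_cast; ring
      · split_ifs <;> push_cast at * <;> omega
      · split_ifs <;> push_cast at * <;> omega

-- A run of trues from a fresh state (start = end): pvLoopA just advances both pointers.
theorem pvLoopA_true_run : ∀ (m : Nat) (rest : List Bool) (e ms ml : Int),
    pvLoopA (List.replicate m true ++ rest) e e ms ml = pvLoopA rest (e + m) (e + m) ms ml := by
  intro m
  induction m with
  | zero => intro rest e ms ml; simp
  | succ m ih =>
    intro rest e ms ml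
    rw [List.replicate_succ]
    show pvLoopA (List.replicate m true ++ rest) (e + 1) (e + 1) ms ml = _
    rw [ih rest (e + 1) ms ml]
    have h1 : e + 1 + (m : Int) = e + ((m : Nat) + 1 : Nat) := by push_cast; ring
    rw [h1]


-- After a false group the remainder starts with true (or is empty): one true step
-- re-freshens A's state regardless of the stale start pointer, then the true run passes.
theorem pvLoop_tail (N : Nat)
    (ih : ∀ (l : List Bool), l.length ≤ N → ∀ (e ms ml : Int), 0 ≤ ml → pvLoopA l e e ms ml = pvLoopB l e ms ml)
    (r : List Bool) (hrN : r.length ≤ N) (hhead : ∀ r', r ≠ false :: r')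
    (s j bs bl : Int) (hbl : 0 ≤ bl) :
    pvLoopA r s j bs bl = pvLoopB r j bs bl := by
  cases r with
  | nil => simp [pvLoopA, pvLoopB]
  | cons d r' =>
    have hd : d = true := by
      cases d
      · exact absurd rfl (hhead r')
      · rfl
    subst hd
    obtain ⟨k2, r2, hkr2⟩ : ∃ k2 r2, pvTakeRun true r' = (k2, r2) := ⟨_, _, rfl⟩
    obtain ⟨hdec2, _⟩ := pvTakeRun_spec true r' k2 r2 hkr2
    have hr2len : r2.length ≤ r'.length := by
      have := pvTakeRun_len true r'; rw [hkr2] at this; exact this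
    have hA : pvLoopA (true :: r') s j bs bl
        = pvLoopA (List.replicate k2 true ++ r2) (j + 1) (j + 1) bs bl := by
      rw [← hdec2]; rfl
    rw [hA, pvLoopA_true_run, ih r2 (by simp at hrN; omega) _ _ _ hbl]
    have hB : pvLoopB (true :: r') j bs bl = pvLoopB r2 (j + (k2 : Int) + 1) bs bl := by
      rw [pvLoopB, hkr2]
      rw [if_neg (by simp)]
    rw [hB]
    have h1 : j + 1 + (k2 : Int) = j + (k2 : Int) + 1 := by ring
    rw [h1]

-- Main invariant: from a fresh state (start = end = e) with a nonnegative best,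
-- A's state machine computes exactly B's group-then-select result.
theorem pvLoop_main : ∀ (N : Nat) (l : List Bool), l.length ≤ N → ∀ (e ms ml : Int),
    0 ≤ ml → pvLoopA l e e ms ml = pvLoopB l e ms ml := by
  intro N
  induction N with
  | zero =>
    intro l hl e ms ml _
    have : l = [] := by cases l <;> simp_all
    subst this; simp [pvLoopA, pvLoopB]
  | succ N ih =>
    intro l hl e ms ml hml
    cases l with
    | nil => simp [pvLoopA, pvLoopB]
    | cons c rest =>
      obtain ⟨k, r, hkr⟩ : ∃ k r, pvTakeRun c rest = (k, r) := ⟨_, _, rfl⟩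
      obtain ⟨hdec, hmax⟩ := pvTakeRun_spec c rest k r hkr
      have hrlen : r.length ≤ rest.length := by
        have := pvTakeRun_len c rest; rw [hkr] at this; exact this
      have hlen : rest.length ≤ N := by simpa using hl
      have hB : pvLoopB (c :: rest) e ms ml
          = if c = false ∧ e + (k : Int) + 1 - e > ml
            then pvLoopB r (e + k + 1) e (e + (k : Int) + 1 - e)
            else pvLoopB r (e + k + 1) ms ml := by
        rw [pvLoopB, hkr]
      cases c with
      | true =>
        rw [hB, if_neg (by simp)]
        have hA : pvLoopA (true :: rest) e e ms ml
            = pvLoopA (List.replicate k true ++ r) (e + 1) (e + 1) ms ml := by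
          rw [← hdec]; rfl
        rw [hA, pvLoopA_true_run, ih r (by omega) _ _ _ hml]
        have h1 : e + 1 + (k : Int) = e + (k : Int) + 1 := by ring
        rw [h1]
      | false =>
        have hA0 : pvLoopA (false :: rest) e e ms ml
            = pvLoopA r e (e + ((k + 1 : Nat) : Int))
                (if e + ((k + 1 : Nat) : Int) - e > ml then e else ms)
                (if e + ((k + 1 : Nat) : Int) - e > ml then e + ((k + 1 : Nat) : Int) - e else ml) := by
          have hsh : false :: rest = List.replicate (k + 1) false ++ r := by
            rw [List.replicate_succ, List.cons_append, hdec]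
          rw [hsh, pvLoopA_false_run (k + 1) r e e ms ml (by omega)]
        have hcast : e + ((k + 1 : Nat) : Int) = e + (k : Int) + 1 := by push_cast; ring
        rw [hcast] at hA0
        rw [hA0, hB]
        have hhead : ∀ r2, r ≠ false :: r2 := fun r2 h => absurd (hmax false r2 h) (by simp)
        by_cases hcond : e + (k : Int) + 1 - e > ml
        · have hC : (false = false ∧ e + (k : Int) + 1 - e > ml) := ⟨rfl, hcond⟩
          rw [if_pos hC, if_pos hcond, if_pos hcond]
          exact pvLoop_tail N ih r (by omega) hhead e (e + (k : Int) + 1) e (e + (k : Int) + 1 - e) (by omega)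
        · have hC : ¬ (false = false ∧ e + (k : Int) + 1 - e > ml) := fun h => hcond h.2
          rw [if_neg hC, if_neg hcond, if_neg hcond]
          exact pvLoop_tail N ih r (by omega) hhead e (e + (k : Int) + 1) ms ml hml

-- ===== VERDICT (by name: the statement is the Claim_ definition above) =====
theorem find_max_free_period_spec : Claim_equal_find_max_free_period := by
  intro schedule _
  unfold Spec_find_max_free_period find_max_free_period find_max_free_period_alt
  rw [pvLoop_main schedule.length schedule le_rfl 0 0 0 le_rfl]
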